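-- pv_equiv track=rewrite | github.com/SekitoNakashima/fixpoint_programming_exam | script/answer.py | count_timeout
-- ===== SOURCE A (Python) =====
-- def count_timeout(error_index_arr):
--     count = 1
--     prev_num = error_index_arr[0]
--     for num in error_index_arr[1:]:
--         if (prev_num + 1) == num:
--             count += 1
--         else:
--             count = 1
--         prev_num = num
--     return count
-- ===== SOURCE B (Python) =====
-- def count_timeout(error_index_arr):
--     rev = error_index_arr[::-1]
--     count = 1
--     prev = rev[0]
--     for x in rev[1:]:
--         if x + 1 == prev:
--             count += 1
--             prev = x
--         else:
--             break
--     return count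
-- ===== Notes on version B (the rewrite author's own statement) =====
-- stated objective: alternative
-- what changed: B reverses the list and walks the trailing run from the end with an early break, instead of A's forward pass that resets a counter across every element.
import Mathlib
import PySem

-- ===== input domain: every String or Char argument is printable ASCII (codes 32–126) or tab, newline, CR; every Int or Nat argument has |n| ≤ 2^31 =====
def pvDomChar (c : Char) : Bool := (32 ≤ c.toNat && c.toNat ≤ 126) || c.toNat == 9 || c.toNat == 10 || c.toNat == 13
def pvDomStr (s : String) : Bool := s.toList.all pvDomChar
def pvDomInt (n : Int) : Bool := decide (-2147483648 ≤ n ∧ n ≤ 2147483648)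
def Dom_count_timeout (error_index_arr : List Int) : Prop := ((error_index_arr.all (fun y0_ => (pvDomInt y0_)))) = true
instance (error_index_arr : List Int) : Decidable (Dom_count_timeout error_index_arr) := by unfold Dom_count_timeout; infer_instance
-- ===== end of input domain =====

-- B scans the trailing run backwards over the reversed list with an early break; equal return value to A on nonempty lists (both raise IndexError on []).

-- ===== PORT A =====
-- forward fold over arr[1:] with state (count, prev_num), counter reset on a gap
def count_timeout (error_index_arr : List Int) : Int :=
  match PySem.List.pyGet? error_index_arr 0 with
  | none => 0  -- IndexError on empty input; excluded by Pre_
  | some p0 =>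
    (List.foldl (fun (st : Int × Int) num => (if st.2 + 1 = num then st.1 + 1 else 1, num))
      (1, p0) (PySem.List.slice error_index_arr (some 1) none)).1

-- ===== PORT B =====
-- the for-loop of Source B with its break: recursion on the rest of the reversed list
def pvAltLoop : Int → Int → List Int → Int
  | count, _, [] => count
  | count, prev, x :: r => if x + 1 = prev then pvAltLoop (count + 1) x r else count

def count_timeout_alt (error_index_arr : List Int) : Int :=
  match PySem.List.slice? error_index_arr none none (-1) with
  | none => 0  -- unreachable: step = -1 ≠ 0
  | some rev =>
    match PySem.List.pyGet? rev 0 with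
    | none => 0  -- IndexError on empty input; excluded by Pre_
    | some prev => pvAltLoop 1 prev (PySem.List.slice rev (some 1) none)

-- ===== PRECONDITION & SPEC =====
-- Pre_ excludes the empty list, on which both Pythons raise IndexError.
def Pre_count_timeout (error_index_arr : List Int) : Prop := error_index_arr ≠ []
instance (error_index_arr : List Int) : Decidable (Pre_count_timeout error_index_arr) := by unfold Pre_count_timeout; infer_instance
def pvWitness_count_timeout : List Int := ([1, 2, 4, 5, 6])

def Spec_count_timeout (error_index_arr : List Int) (out : Int) : Prop := out = count_timeout_alt error_index_arr
instance (error_index_arr : List Int) (out : Int) : Decidable (Spec_count_timeout error_index_arr out) := by unfold Spec_count_timeout; infer_instance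

-- ===== CLAIM (what is proved, stated in full; the proofs are below) =====
def Claim_equal_count_timeout : Prop := ∀ (error_index_arr : List Int), Dom_count_timeout error_index_arr → Pre_count_timeout error_index_arr → Spec_count_timeout error_index_arr (count_timeout error_index_arr)

-- ===== LEMMAS AND PROOFS =====

theorem pvAltLoop_succ (r : List Int) : ∀ (c p : Int), pvAltLoop (c + 1) p r = pvAltLoop c p r + 1 := by
  induction r with
  | nil => intro c p; rfl
  | cons x r ih =>
    intro c p
    simp only [pvAltLoop]
    split
    · exact ih (c + 1) x
    · rfl

theorem pvFoldl_snd (s : List Int) : ∀ (c p : Int),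
    (List.foldl (fun (st : Int × Int) num => (if st.2 + 1 = num then st.1 + 1 else 1, num)) (c, p) s).2
      = ((p :: s).getLast (by simp)) := by
  induction s with
  | nil => intro c p; simp
  | cons x s ih =>
    intro c p
    simp only [List.foldl_cons]
    rw [ih]
    exact (List.getLast_cons (by simp)).symm

theorem pvGetLast_of_rev {l : List Int} {L : Int} {r : List Int} (hl : l ≠ [])
    (h : l.reverse = L :: r) : l.getLast hl = L := by
  have h2 : l.getLast? = some L := by rw [← List.head?_reverse, h]; rfl
  have h3 := List.getLast?_eq_some_getLast (l := l) hl
  rw [h3] at h2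
  exact Option.some_injective _ h2

theorem pvMain (t : List Int) (h : Int) : ∀ (L : Int) (r : List Int), (h :: t).reverse = L :: r →
    (List.foldl (fun (st : Int × Int) num => (if st.2 + 1 = num then st.1 + 1 else 1, num)) (1, h) t).1
      = pvAltLoop 1 L r := by
  induction t using List.reverseRecOn with
  | nil =>
    intro L r hLr
    simp only [List.reverse_cons, List.reverse_nil, List.nil_append] at hLr
    obtain ⟨rfl, rfl⟩ : h = L ∧ [] = r := by
      constructor <;> [exact (List.cons.injEq ..).mp hLr |>.1; exact (List.cons.injEq ..).mp hLr |>.2]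
    rfl
  | append_singleton s n ih =>
    intro L r hLr
    have hrev : (h :: (s ++ [n])).reverse = n :: (h :: s).reverse := by
      rw [show h :: (s ++ [n]) = (h :: s) ++ [n] by simp, List.reverse_append]; rfl
    rw [hrev] at hLr
    obtain ⟨rfl, hr⟩ : n = L ∧ (h :: s).reverse = r := by
      constructor <;> [exact (List.cons.injEq ..).mp hLr |>.1; exact (List.cons.injEq ..).mp hLr |>.2]
    obtain ⟨L', r', hL'⟩ := List.exists_cons_of_ne_nil (l := (h :: s).reverse) (by simp)
    subst hr
    rw [List.foldl_append]
    simp only [List.foldl_cons, List.foldl_nil]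
    rw [pvFoldl_snd, pvGetLast_of_rev (by simp) hL', hL']
    simp only [pvAltLoop]
    rw [ih L' r' hL']
    split
    · rw [show (1 : Int) + 1 = 1 + 1 from rfl, pvAltLoop_succ]
    · rfl

-- ===== VERDICT (by name: the statement is the Claim_ definition above) =====
theorem count_timeout_spec : Claim_equal_count_timeout := by
  intro arr _ hpre
  obtain ⟨h, t, rfl⟩ := List.exists_cons_of_ne_nil hpre
  unfold Spec_count_timeout count_timeout count_timeout_alt
  rw [PySem.List.slice?_none_none_neg_one]
  have h0 : PySem.List.pyGet? (h :: t) 0 = some h := by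
    simp [PySem.List.pyGet?_natCast (h :: t) 0]
  obtain ⟨L, r, hLr⟩ := List.exists_cons_of_ne_nil (l := (h :: t).reverse) (by simp)
  rw [hLr]
  have h1 : PySem.List.pyGet? (L :: r) 0 = some L := by
    simp [PySem.List.pyGet?_natCast (L :: r) 0]
  simp only [h0, h1, PySem.List.slice_from_one, List.tail_cons]
  exact pvMain t h L r hLr
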